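-- pv_equiv track=rewrite | github.com/imahdimir/portfos-py-modules | portfos_py/Dev/maybe_useful_later.py | find_n_jmonth_before
-- ===== SOURCE A (Python) =====
-- def find_n_jmonth_before(current_month , howmany=1) :
--   if howmany == 1 :
--     if current_month % 100 == 1 :
--       previous_month = (current_month // 100 - 1) * 100 + 12
--     else :
--       previous_month = current_month - 1
--     return previous_month
--   if howmany == 0 :
--     return current_month
--   return find_n_jmonth_before(find_n_jmonth_before(current_month , 1) ,
--                               howmany - 1)
-- ===== SOURCE B (Python) =====
-- def find_n_jmonth_before(current_month, howmany=1):
--     # Closed form of the month recurrence: each step is m-1, except m-89 when m % 100 == 1.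
--     r = (current_month - 1) % 100          # plain decrements before the first wrap
--     if howmany <= r:
--         return current_month - howmany
--     q, s = divmod(howmany - r - 1, 12)     # full 12-step cycles (-100 each) after the wrap
--     return current_month - r - 100 * q - 89 - s
-- ===== Notes on version B (the rewrite author's own statement) =====
-- stated objective: faster
-- what changed: Replaces A's one-month-at-a-time recursion by an O(1) closed form: count plain decrements until the first month-field wrap, then whole 12-step/-100 cycles via divmod, with no recursion at all.
import Mathlib
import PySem

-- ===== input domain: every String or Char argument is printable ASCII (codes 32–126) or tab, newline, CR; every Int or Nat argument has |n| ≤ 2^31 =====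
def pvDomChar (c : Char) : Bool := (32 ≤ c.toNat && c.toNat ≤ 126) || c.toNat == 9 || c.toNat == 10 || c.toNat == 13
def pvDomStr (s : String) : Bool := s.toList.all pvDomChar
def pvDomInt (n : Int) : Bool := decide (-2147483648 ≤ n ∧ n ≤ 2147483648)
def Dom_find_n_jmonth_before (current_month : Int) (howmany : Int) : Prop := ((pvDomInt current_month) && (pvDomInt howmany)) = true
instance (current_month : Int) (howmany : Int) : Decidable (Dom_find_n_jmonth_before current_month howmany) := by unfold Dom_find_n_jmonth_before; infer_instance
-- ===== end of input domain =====

-- B replaces A's step-by-step recursion (O(howmany)) by an O(1) closed form of the same recurrence.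

-- ===== PORT A =====
-- Literal port of A's recursion; for howmany < 0 the Python recursion never terminates
-- (RecursionError), so that branch is excluded by Pre_ and the port returns a junk 0 there.
def find_n_jmonth_before (current_month : Int) (howmany : Int) : Int :=
  if howmany = 1 then
    if PySem.Int.mod current_month 100 = 1 then
      (PySem.Int.floordiv current_month 100 - 1) * 100 + 12
    else
      current_month - 1
  else if howmany = 0 then current_month
  else if howmany < 0 then 0   -- unreachable under Pre_ (Python raises RecursionError here)
  else find_n_jmonth_before (find_n_jmonth_before current_month 1) (howmany - 1)
termination_by howmany.toNat
decreasing_by all_goals omega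

-- ===== PORT B =====
def find_n_jmonth_before_alt (current_month : Int) (howmany : Int) : Int :=
  let r := PySem.Int.mod (current_month - 1) 100
  if howmany ≤ r then
    current_month - howmany
  else
    let q := PySem.Int.floordiv (howmany - r - 1) 12
    let s := PySem.Int.mod (howmany - r - 1) 12
    current_month - r - 100 * q - 89 - s

-- ===== PRECONDITION & SPEC =====
-- A's recursion terminates exactly for howmany ≥ 0; for negative howmany the Python
-- recursion never reaches its base cases and raises RecursionError.
def Pre_find_n_jmonth_before (current_month : Int) (howmany : Int) : Prop := 0 ≤ howmany
instance (current_month : Int) (howmany : Int) : Decidable (Pre_find_n_jmonth_before current_month howmany) := by unfold Pre_find_n_jmonth_before; infer_instance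
def pvWitness_find_n_jmonth_before : Int × Int := (140001, 3)

def Spec_find_n_jmonth_before (current_month : Int) (howmany : Int) (out : Int) : Prop := out = find_n_jmonth_before_alt current_month howmany
instance (current_month : Int) (howmany : Int) (out : Int) : Decidable (Spec_find_n_jmonth_before current_month howmany out) := by unfold Spec_find_n_jmonth_before; infer_instance

-- ===== CLAIM (what is proved, stated in full; the proofs are below) =====
def Claim_equal_find_n_jmonth_before : Prop := ∀ (current_month : Int) (howmany : Int), Dom_find_n_jmonth_before current_month howmany → Pre_find_n_jmonth_before current_month howmany → Spec_find_n_jmonth_before current_month howmany (find_n_jmonth_before current_month howmany)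

-- ===== LEMMAS AND PROOFS =====

-- A's one-month step, written arithmetically: subtract 89 on a wrap, else subtract 1.
theorem step_eq (m : Int) :
    find_n_jmonth_before m 1 =
      if m % 100 = 1 then m - 89 else m - 1 := by
  unfold find_n_jmonth_before
  rw [if_pos rfl, PySem.Int.mod_eq_emod_of_pos (by norm_num : (0:Int) < 100),
    PySem.Int.floordiv_eq_ediv_of_pos (by norm_num : (0:Int) < 100)]
  split_ifs with h
  · omega
  · rfl

-- B satisfies A's recurrence at 0.
theorem alt_zero (m : Int) : find_n_jmonth_before_alt m 0 = m := by
  unfold find_n_jmonth_before_alt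
  simp only [PySem.Int.mod_eq_emod_of_pos (by norm_num : (0:Int) < 100)]
  have := Int.emod_nonneg (m - 1) (by norm_num : (100:Int) ≠ 0)
  simp only [if_pos this]
  ring

-- B satisfies A's recurrence at 1.
theorem alt_one (m : Int) :
    find_n_jmonth_before_alt m 1 = if m % 100 = 1 then m - 89 else m - 1 := by
  unfold find_n_jmonth_before_alt
  simp only [PySem.Int.mod_eq_emod_of_pos (by norm_num : (0:Int) < 100),
    PySem.Int.mod_eq_emod_of_pos (by norm_num : (0:Int) < 12),
    PySem.Int.floordiv_eq_ediv_of_pos (by norm_num : (0:Int) < 12)]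
  split_ifs <;> omega

-- B satisfies A's recursive equation for howmany ≥ 2.
theorem alt_step (m h : Int) (hh : 2 ≤ h) :
    find_n_jmonth_before_alt m h =
      find_n_jmonth_before_alt (if m % 100 = 1 then m - 89 else m - 1) (h - 1) := by
  unfold find_n_jmonth_before_alt
  simp only [PySem.Int.mod_eq_emod_of_pos (by norm_num : (0:Int) < 100),
    PySem.Int.mod_eq_emod_of_pos (by norm_num : (0:Int) < 12),
    PySem.Int.floordiv_eq_ediv_of_pos (by norm_num : (0:Int) < 12)]
  split_ifs <;> omega

theorem agree (n : Nat) : ∀ (m h : Int), h.toNat = n → 0 ≤ h →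
    find_n_jmonth_before m h = find_n_jmonth_before_alt m h := by
  induction n using Nat.strong_induction_on with
  | _ n ih =>
    intro m h hn h0
    by_cases h1 : h = 1
    · subst h1; rw [step_eq, alt_one]
    · by_cases hz : h = 0
      · subst hz
        rw [alt_zero]
        unfold find_n_jmonth_before
        simp
      · have h2 : 2 ≤ h := by omega
        rw [show find_n_jmonth_before m h =
            find_n_jmonth_before (find_n_jmonth_before m 1) (h - 1) by
          conv_lhs => unfold find_n_jmonth_before
          simp only [if_neg h1, if_neg hz, if_neg (by omega : ¬ h < 0)]]
        rw [step_eq, alt_step m h h2]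
        exact ih (h - 1).toNat (by omega) _ (h - 1) rfl (by omega)

-- ===== VERDICT (by name: the statement is the Claim_ definition above) =====
theorem find_n_jmonth_before_spec : Claim_equal_find_n_jmonth_before := by
  intro m h _ hpre
  exact agree h.toNat m h rfl hpre
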